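-- pv_equiv track=rewrite | github.com/adanzl/leetcode-practice | py/q2500/Q2552.py | countQuadruplets1
-- ===== SOURCE A (Python) =====
-- from typing import List
--
-- def countQuadruplets1(nums: List[int]) -> int:
--     n = len(nums)
--     ans = 0
--     cnt = [0] * n
--     for i in range(n):
--         large = 0
--         for j in range(i):
--             if nums[i] > nums[j]:
--                 ans += cnt[j]
--                 large += 1
--             else:
--                 cnt[j] += large
--
--     return ans
-- ===== SOURCE B (Python) =====
-- from typing import List
--
-- def countQuadruplets1(nums: List[int]) -> int:
--     # Fix the middle pair (j, k): for each such pair with nums[k] <= nums[j],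
--     # multiply (#i < j with nums[i] < nums[k]) by (#l > k with nums[l] > nums[j]).
--     n = len(nums)
--     less_row = [0] * n  # less_row[k] = number of i < j with nums[i] < nums[k]
--     ans = 0
--     for j in range(n):
--         great = 0  # number of l > k with nums[l] > nums[j], scanning k downward
--         for k in range(n - 1, j, -1):
--             if nums[k] > nums[j]:
--                 great += 1
--             else:
--                 ans += less_row[k] * great
--         for k in range(n):
--             if nums[j] < nums[k]:
--                 less_row[k] += 1
--     return ans
-- ===== Notes on version B (the rewrite author's own statement) =====
-- stated objective: alternative
-- what changed: Replaces A's running cnt array of partial-pattern counts (accumulated across an i-outer/j-inner sweep) by the fix-the-middle-pair decomposition: for each pair j<k with nums[k] <= nums[j] it multiplies a maintained prefix count less_row[k] = number of i<j with nums[i]<nums[k] by a backward-scan count great = number of l>k with nums[l]>nums[j].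
import Mathlib
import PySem

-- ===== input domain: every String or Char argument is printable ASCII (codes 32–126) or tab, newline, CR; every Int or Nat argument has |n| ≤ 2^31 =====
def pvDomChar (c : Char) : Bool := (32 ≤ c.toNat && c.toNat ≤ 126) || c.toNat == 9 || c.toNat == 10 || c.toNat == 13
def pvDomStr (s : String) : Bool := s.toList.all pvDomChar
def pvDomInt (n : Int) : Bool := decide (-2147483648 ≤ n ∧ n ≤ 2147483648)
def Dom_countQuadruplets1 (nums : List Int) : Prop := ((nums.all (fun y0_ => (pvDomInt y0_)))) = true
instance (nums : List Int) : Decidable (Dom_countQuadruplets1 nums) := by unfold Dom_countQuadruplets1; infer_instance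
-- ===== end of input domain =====

-- B replaces A's running cnt array of partial-pattern counts by the fix-the-middle-pair
-- decomposition (maintained prefix-count row × backward suffix scan); an alternative
-- algorithm of the same cost.

-- ===== PORT A =====
-- literal transliteration of A: outer i-loop, inner j-loop with state (ans, cnt, large);
-- every index produced by range(...) is in bounds, so getD is exact for nums[i]/cnt[j].
def countQuadruplets1 (nums : List Int) : Int :=
  let n := nums.length
  let r := (List.range n).foldl (fun (s : Int × List Int) i =>
      let t := (List.range i).foldl (fun (t : Int × List Int × Int) j =>
          if nums.getD i 0 > nums.getD j 0 then
            (t.1 + t.2.1.getD j 0, t.2.1, t.2.2 + 1)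
          else
            (t.1, t.2.1.set j (t.2.1.getD j 0 + t.2.2), t.2.2)) (s.1, s.2, (0 : Int))
      (t.1, t.2.1)) ((0 : Int), List.replicate n (0 : Int))
  r.1

-- ===== PORT B =====
-- literal transliteration of Source B; range(n-1, j, -1) is the reverse of range' (j+1) (n-(j+1)).
def countQuadruplets1_alt (nums : List Int) : Int :=
  let n := nums.length
  let r := (List.range n).foldl (fun (s : Int × List Int) j =>
      let t := ((List.range' (j+1) (n - (j+1))).reverse).foldl
          (fun (u : Int × Int) k =>
            if nums.getD k 0 > nums.getD j 0 then (u.1, u.2 + 1)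
            else (u.1 + s.2.getD k 0 * u.2, u.2)) (s.1, (0 : Int))
      let row := (List.range n).foldl (fun (row : List Int) k =>
            if nums.getD j 0 < nums.getD k 0 then row.set k (row.getD k 0 + 1) else row) s.2
      (t.1, row)) ((0 : Int), List.replicate n (0 : Int))
  r.1

-- ===== PRECONDITION & SPEC =====
def Spec_countQuadruplets1 (nums : List Int) (out : Int) : Prop := out = countQuadruplets1_alt nums
instance (nums : List Int) (out : Int) : Decidable (Spec_countQuadruplets1 nums out) := by unfold Spec_countQuadruplets1; infer_instance

-- ===== CLAIM (what is proved, stated in full; the proofs are below) =====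
def Claim_equal_countQuadruplets1 : Prop := ∀ (nums : List Int), Dom_countQuadruplets1 nums → Spec_countQuadruplets1 nums (countQuadruplets1 nums)

-- ===== LEMMAS AND PROOFS =====
-- gv nums i = nums[i]; Lv nums j k = #{a<j : nums[a]<nums[k]};
-- Cv nums i j = value of A's cnt[j] after i outer rounds;
-- Hv nums j t m = suffix count used by B's backward scan;
-- AA/BA = closed forms of the two ports; Tsum = the common triple sum.
def gv (nums : List Int) (i : Nat) : Int := nums.getD i 0
def Lv (nums : List Int) (j k : Nat) : Int :=
  (((List.range j).filter (fun a => gv nums a < gv nums k)).length : Int)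
lemma Lv_succ (nums : List Int) (m k : Nat) :
    Lv nums (m+1) k = Lv nums m k + (if gv nums m < gv nums k then 1 else 0) := by
  unfold Lv
  rw [List.range_succ, List.filter_append]
  simp only [List.length_append]
  split_ifs with h <;> simp [List.filter, h]
lemma Lv_zero (nums : List Int) (k : Nat) : Lv nums 0 k = 0 := by simp [Lv]
lemma getD_set' (l : List Int) (i j : Nat) (a : Int) :
    (l.set i a).getD j 0 = if i = j ∧ j < l.length then a else l.getD j 0 := by
  simp [List.getD_eq_getElem?_getD, List.getElem?_set]
  split_ifs <;> simp_all
def stepA (nums : List Int) (i : Nat) (t : Int × List Int × Int) (j : Nat) : Int × List Int × Int :=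
  if nums.getD i 0 > nums.getD j 0 then (t.1 + t.2.1.getD j 0, t.2.1, t.2.2 + 1)
  else (t.1, t.2.1.set j (t.2.1.getD j 0 + t.2.2), t.2.2)

lemma innerA (nums : List Int) (i : Nat) (hin : i ≤ nums.length) (ans : Int) (cnt : List Int)
    (hc : cnt.length = nums.length) :
    ∀ (m : Nat), m ≤ i →
      (((List.range m).foldl (stepA nums i) (ans, cnt, (0:Int))).1
          = ans + ∑ j ∈ Finset.range m, (if gv nums j < gv nums i then cnt.getD j 0 else 0))
      ∧ ((List.range m).foldl (stepA nums i) (ans, cnt, (0:Int))).2.1.length = nums.length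
      ∧ (∀ j, ((List.range m).foldl (stepA nums i) (ans, cnt, (0:Int))).2.1.getD j 0
          = cnt.getD j 0 + (if j < m ∧ gv nums i ≤ gv nums j then Lv nums j i else 0))
      ∧ ((List.range m).foldl (stepA nums i) (ans, cnt, (0:Int))).2.2 = Lv nums m i := by
  intro m
  induction m with
  | zero =>
      intro _
      refine ⟨by simp, by simpa using hc, fun j => by simp, by simp [Lv_zero]⟩
  | succ m ih =>
      intro hm
      have hmi : m ≤ i := Nat.le_of_succ_le hm
      obtain ⟨h1, h2, h3, h4⟩ := ih hmi
      simp only [List.range_succ, List.foldl_append, List.foldl_cons, List.foldl_nil]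
      set r := (List.range m).foldl (stepA nums i) (ans, cnt, (0:Int)) with hr
      have hmn : m < nums.length := lt_of_lt_of_le hm hin
      have hrm : r.2.1.getD m 0 = cnt.getD m 0 := by rw [h3]; simp
      unfold stepA
      by_cases hgt : nums.getD i 0 > nums.getD m 0
      · have hgt' : gv nums m < gv nums i := hgt
        simp only [if_pos hgt]
        refine ⟨?_, h2, ?_, ?_⟩
        · rw [h1, hrm, Finset.sum_range_succ, if_pos hgt']; ring
        · intro j
          have hc' : ¬ (gv nums i ≤ gv nums m) := not_le.mpr hgt'
          rw [h3 j]
          by_cases hj : j = m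
          · subst hj; simp [hc']
          · split_ifs <;> try rfl
            all_goals exfalso; rename_i hA hB
            · exact hB ⟨by omega, hA.2⟩
            · exact hA ⟨by omega, hB.2⟩
        · rw [h4, Lv_succ, if_pos hgt']
      · have hle : gv nums i ≤ gv nums m := not_lt.mp hgt
        have hngt : ¬ (gv nums m < gv nums i) := not_lt.mpr hle
        simp only [if_neg hgt]
        refine ⟨?_, by simp [List.length_set, h2], ?_, ?_⟩
        · rw [h1, Finset.sum_range_succ, if_neg hngt]; ring
        · intro j
          rw [getD_set', h2]
          by_cases hj : m = j
          · subst hj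
            rw [if_pos ⟨rfl, hmn⟩, hrm, h4]
            rw [if_pos ⟨by omega, hle⟩]
          · rw [if_neg (by tauto), h3 j]
            split_ifs <;> try rfl
            all_goals exfalso; rename_i hA hB
            · exact hB ⟨by omega, hA.2⟩
            · exact hA ⟨by omega, hB.2⟩
        · rw [h4, Lv_succ, if_neg hngt]; ring

def Cv (nums : List Int) (i j : Nat) : Int :=
  ∑ k ∈ Finset.range i, (if j < k ∧ gv nums k ≤ gv nums j then Lv nums j k else 0)
def AA (nums : List Int) (m : Nat) : Int :=
  ∑ i ∈ Finset.range m, ∑ j ∈ Finset.range i, (if gv nums j < gv nums i then Cv nums i j else 0)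
def outA (nums : List Int) (s : Int × List Int) (i : Nat) : Int × List Int :=
  let t := (List.range i).foldl (stepA nums i) (s.1, s.2, (0:Int))
  (t.1, t.2.1)
lemma Cv_succ (nums : List Int) (i j : Nat) :
    Cv nums (i+1) j = Cv nums i j + (if j < i ∧ gv nums i ≤ gv nums j then Lv nums j i else 0) := by
  simp [Cv, Finset.sum_range_succ]
lemma Cv_zero (nums : List Int) (j : Nat) : Cv nums 0 j = 0 := by simp [Cv]

lemma outerA (nums : List Int) :
    ∀ (m : Nat), m ≤ nums.length →
      (((List.range m).foldl (outA nums) ((0:Int), List.replicate nums.length (0:Int))).1 = AA nums m)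
      ∧ ((List.range m).foldl (outA nums) ((0:Int), List.replicate nums.length (0:Int))).2.length = nums.length
      ∧ (∀ j, ((List.range m).foldl (outA nums) ((0:Int), List.replicate nums.length (0:Int))).2.getD j 0
            = Cv nums m j) := by
  intro m
  induction m with
  | zero =>
      intro _
      refine ⟨by simp [AA], by simp, fun j => ?_⟩
      simp [Cv_zero, List.getD_eq_getElem?_getD, List.getElem?_replicate]
      split <;> simp
  | succ m ih =>
      intro hm
      have hmn : m ≤ nums.length := Nat.le_of_succ_le hm
      obtain ⟨h1, h2, h3⟩ := ih hmn
      simp only [List.range_succ, List.foldl_append, List.foldl_cons, List.foldl_nil]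
      set r := (List.range m).foldl (outA nums) ((0:Int), List.replicate nums.length (0:Int)) with hr
      obtain ⟨g1, g2, g3, _⟩ := innerA nums m hmn r.1 r.2 h2 m le_rfl
      show (outA nums r m).1 = AA nums (m+1) ∧ _ ∧ _
      unfold outA
      refine ⟨?_, g2, fun j => ?_⟩
      · simp only []
        rw [g1, h1,
          show AA nums (m+1) = AA nums m + ∑ j ∈ Finset.range m, (if gv nums j < gv nums m then Cv nums m j else 0) from by
            simp only [AA]; rw [Finset.sum_range_succ]]
        congr 1
        apply Finset.sum_congr rfl
        intro j hj
        rw [h3 j]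
      · simp only []
        rw [g3 j, h3 j, Cv_succ]

def Hv (nums : List Int) (j t m : Nat) : Int :=
  ∑ s ∈ Finset.range m, (if t < s ∧ gv nums j < gv nums (j+1+s) then (1:Int) else 0)
def stepBk (nums : List Int) (j : Nat) (row : List Int) (u : Int × Int) (k : Nat) : Int × Int :=
  if nums.getD k 0 > nums.getD j 0 then (u.1, u.2 + 1) else (u.1 + row.getD k 0 * u.2, u.2)

lemma Hv_succ (nums : List Int) (j t m : Nat) :
    Hv nums j t (m+1) = Hv nums j t m + (if t < m ∧ gv nums j < gv nums (j+1+m) then 1 else 0) := by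
  simp only [Hv]; rw [Finset.sum_range_succ]

lemma Hv_last (nums : List Int) (j m : Nat) : Hv nums j m (m+1) = 0 := by
  apply Finset.sum_eq_zero
  intro s hs
  simp only [Finset.mem_range] at hs
  have h : ¬ m < s := by omega
  simp [h]

lemma innerB (nums : List Int) (j : Nat) (row : List Int) :
    ∀ (m : Nat) (ans gr : Int),
      ((((List.range' (j+1) m).reverse).foldl (stepBk nums j row) (ans, gr)).1
        = ans + ∑ t ∈ Finset.range m,
            (if gv nums j < gv nums (j+1+t) then 0
             else row.getD (j+1+t) 0 * (gr + Hv nums j t m)))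
      ∧ (((List.range' (j+1) m).reverse).foldl (stepBk nums j row) (ans, gr)).2
        = gr + ∑ t ∈ Finset.range m, (if gv nums j < gv nums (j+1+t) then (1:Int) else 0) := by
  intro m
  induction m with
  | zero => intro ans gr; simp
  | succ m ih =>
      intro ans gr
      rw [List.range'_1_concat, List.reverse_append]
      simp only [List.reverse_singleton, List.singleton_append, List.foldl_cons]
      by_cases hgt : nums.getD (j+1+m) 0 > nums.getD j 0
      · have hgt' : gv nums j < gv nums (j+1+m) := hgt
        rw [show stepBk nums j row (ans, gr) (j+1+m) = (ans, gr+1) from by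
          simp only [stepBk]; rw [if_pos hgt]]
        obtain ⟨i1, i2⟩ := ih ans (gr+1)
        refine ⟨?_, ?_⟩
        · rw [i1, Finset.sum_range_succ, if_pos hgt', add_zero]
          congr 1
          apply Finset.sum_congr rfl
          intro t ht
          simp only [Finset.mem_range] at ht
          by_cases hc : gv nums j < gv nums (j+1+t)
          · rw [if_pos hc, if_pos hc]
          · rw [if_neg hc, if_neg hc, Hv_succ, if_pos ⟨ht, hgt'⟩]; ring
        · rw [i2, Finset.sum_range_succ, if_pos hgt']; ring
      · have hle' : ¬ (gv nums j < gv nums (j+1+m)) := hgt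
        rw [show stepBk nums j row (ans, gr) (j+1+m) = (ans + row.getD (j+1+m) 0 * gr, gr) from by
          simp only [stepBk]; rw [if_neg hgt]]
        obtain ⟨i1, i2⟩ := ih (ans + row.getD (j+1+m) 0 * gr) gr
        refine ⟨?_, ?_⟩
        · rw [i1, Finset.sum_range_succ, if_neg hle', Hv_last, add_zero]
          have hcg : ∀ t ∈ Finset.range m,
              (if gv nums j < gv nums (j+1+t) then 0
               else row.getD (j+1+t) 0 * (gr + Hv nums j t (m+1)))
              = (if gv nums j < gv nums (j+1+t) then 0
               else row.getD (j+1+t) 0 * (gr + Hv nums j t m)) := by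
            intro t ht
            simp only [Finset.mem_range] at ht
            by_cases hc : gv nums j < gv nums (j+1+t)
            · rw [if_pos hc, if_pos hc]
            · rw [if_neg hc, if_neg hc, Hv_succ, if_neg (by tauto)]; ring
          rw [Finset.sum_congr rfl hcg]; ring
        · rw [i2, Finset.sum_range_succ, if_neg hle']; ring

def stepRow (nums : List Int) (j : Nat) (row : List Int) (k : Nat) : List Int :=
  if nums.getD j 0 < nums.getD k 0 then row.set k (row.getD k 0 + 1) else row
def outB (nums : List Int) (s : Int × List Int) (j : Nat) : Int × List Int :=
  let t := ((List.range' (j+1) (nums.length - (j+1))).reverse).foldl (stepBk nums j s.2) (s.1, (0:Int))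
  (t.1, (List.range nums.length).foldl (stepRow nums j) s.2)
def BA (nums : List Int) (m : Nat) : Int :=
  ∑ j ∈ Finset.range m, ∑ t ∈ Finset.range (nums.length - (j+1)),
    (if gv nums j < gv nums (j+1+t) then 0
     else Lv nums j (j+1+t) * Hv nums j t (nums.length - (j+1)))

lemma rowUpd (nums : List Int) (j : Nat) (row : List Int) :
    ∀ (m : Nat),
      ((List.range m).foldl (stepRow nums j) row).length = row.length
      ∧ (∀ k, ((List.range m).foldl (stepRow nums j) row).getD k 0
          = row.getD k 0 + (if k < m ∧ k < row.length ∧ gv nums j < gv nums k then 1 else 0)) := by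
  intro m
  induction m with
  | zero => exact ⟨rfl, fun k => by simp⟩
  | succ m ih =>
      obtain ⟨h1, h2⟩ := ih
      simp only [List.range_succ, List.foldl_append, List.foldl_cons, List.foldl_nil]
      set r := (List.range m).foldl (stepRow nums j) row with hr
      by_cases hc : nums.getD j 0 < nums.getD m 0
      · have hc' : gv nums j < gv nums m := hc
        rw [show stepRow nums j r m = r.set m (r.getD m 0 + 1) from by
          simp only [stepRow]; rw [if_pos hc]]
        refine ⟨by simp [List.length_set, h1], fun k => ?_⟩
        rw [getD_set', h1]
        by_cases hk : m = k
        · subst hk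
          by_cases hlen : m < row.length
          · rw [if_pos ⟨rfl, hlen⟩, h2 m,
              if_neg (fun h => Nat.lt_irrefl m h.1),
              if_pos ⟨Nat.lt_succ_self m, hlen, hc'⟩]
            ring
          · rw [if_neg (fun h => hlen h.2), h2 m,
              if_neg (fun h => Nat.lt_irrefl m h.1),
              if_neg (fun h => hlen h.2.1)]
        · rw [if_neg (fun h => hk h.1), h2 k]
          split_ifs <;> try rfl
          all_goals exfalso; rename_i hA hB
          · exact hB ⟨by omega, hA.2⟩
          · exact hA ⟨by omega, hB.2⟩
      · have hc' : ¬ gv nums j < gv nums m := hc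
        rw [show stepRow nums j r m = r from by simp only [stepRow]; rw [if_neg hc]]
        refine ⟨h1, fun k => ?_⟩
        rw [h2 k]
        by_cases hk : k = m
        · subst hk
          rw [if_neg (fun h => Nat.lt_irrefl k h.1), if_neg (fun h => hc' h.2.2)]
        · split_ifs <;> try rfl
          all_goals exfalso; rename_i hA hB
          · exact hB ⟨by omega, hA.2.1, hA.2.2⟩
          · exact hA ⟨by omega, hB.2.1, hB.2.2⟩

lemma outerB (nums : List Int) :
    ∀ (m : Nat), m ≤ nums.length →
      (((List.range m).foldl (outB nums) ((0:Int), List.replicate nums.length (0:Int))).1 = BA nums m)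
      ∧ ((List.range m).foldl (outB nums) ((0:Int), List.replicate nums.length (0:Int))).2.length = nums.length
      ∧ (∀ k, k < nums.length →
          ((List.range m).foldl (outB nums) ((0:Int), List.replicate nums.length (0:Int))).2.getD k 0
            = Lv nums m k) := by
  intro m
  induction m with
  | zero =>
      intro _
      refine ⟨by simp [BA], by simp, fun k hk => ?_⟩
      simp [Lv_zero, List.getD_eq_getElem?_getD, List.getElem?_replicate]
      split <;> simp
  | succ m ih =>
      intro hm
      have hmn : m ≤ nums.length := Nat.le_of_succ_le hm
      have hmlt : m < nums.length := hm
      obtain ⟨h1, h2, h3⟩ := ih hmn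
      simp only [List.range_succ, List.foldl_append, List.foldl_cons, List.foldl_nil]
      set r := (List.range m).foldl (outB nums) ((0:Int), List.replicate nums.length (0:Int)) with hr
      obtain ⟨i1, _⟩ := innerB nums m r.2 (nums.length - (m+1)) r.1 0
      obtain ⟨w1, w2⟩ := rowUpd nums m r.2 nums.length
      show (outB nums r m).1 = BA nums (m+1) ∧ _ ∧ _
      unfold outB
      refine ⟨?_, by rw [w1, h2], fun k hk => ?_⟩
      · simp only []
        rw [i1, h1,
          show BA nums (m+1) = BA nums m + ∑ t ∈ Finset.range (nums.length - (m+1)),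
            (if gv nums m < gv nums (m+1+t) then 0
             else Lv nums m (m+1+t) * Hv nums m t (nums.length - (m+1))) from by
            simp only [BA]; rw [Finset.sum_range_succ]]
        congr 1
        apply Finset.sum_congr rfl
        intro t ht
        simp only [Finset.mem_range] at ht
        by_cases hc : gv nums m < gv nums (m+1+t)
        · rw [if_pos hc, if_pos hc]
        · rw [if_neg hc, if_neg hc, h3 (m+1+t) (by omega), zero_add]
      · simp only []
        rw [w2 k, h3 k hk, Lv_succ]
        rw [h2]
        by_cases hc : gv nums m < gv nums k
        · rw [if_pos ⟨hk, hk, hc⟩, if_pos hc]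
        · rw [if_neg (fun h => hc h.2.2), if_neg hc]

def Tf (nums : List Int) (j k l : Nat) : Int :=
  if j < k ∧ k < l ∧ gv nums k ≤ gv nums j ∧ gv nums j < gv nums l then Lv nums j k else 0
def Tsum (nums : List Int) : Int :=
  ∑ j ∈ Finset.range nums.length, ∑ k ∈ Finset.range nums.length,
    ∑ l ∈ Finset.range nums.length, Tf nums j k l

lemma sum_extend (n m : Nat) (h : m ≤ n) (F : Nat → Int) :
    ∑ x ∈ Finset.range m, F x = ∑ x ∈ Finset.range n, (if x < m then F x else 0) := by
  have hr : Finset.range m = (Finset.range n).filter (fun x => x < m) := by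
    ext x; simp; omega
  rw [hr, Finset.sum_filter]

lemma sum_shift (a m : Nat) (F : Nat → Int) :
    ∑ t ∈ Finset.range m, F (a+t) = ∑ k ∈ Finset.range (a+m), (if a ≤ k then F k else 0) := by
  induction m with
  | zero =>
      simp
      exact (Finset.sum_eq_zero (fun k hk => by
        simp only [Finset.mem_range] at hk
        rw [if_neg (by omega)])).symm
  | succ m ih =>
      rw [Finset.sum_range_succ, ih, Nat.add_succ, Finset.sum_range_succ, if_pos (by omega)]

lemma AA_eq_T (nums : List Int) : AA nums nums.length = Tsum nums := by
  have step1 : AA nums nums.length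
      = ∑ l ∈ Finset.range nums.length, ∑ j ∈ Finset.range nums.length,
          ∑ k ∈ Finset.range nums.length, Tf nums j k l := by
    simp only [AA]
    apply Finset.sum_congr rfl
    intro l hl
    simp only [Finset.mem_range] at hl
    rw [sum_extend nums.length l (le_of_lt hl)]
    apply Finset.sum_congr rfl
    intro j _
    by_cases h1 : j < l ∧ gv nums j < gv nums l
    · rw [if_pos h1.1, if_pos h1.2]
      simp only [Cv]
      rw [sum_extend nums.length l (le_of_lt hl)]
      apply Finset.sum_congr rfl
      intro k _
      by_cases hT : j < k ∧ k < l ∧ gv nums k ≤ gv nums j ∧ gv nums j < gv nums l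
      · rw [if_pos hT.2.1, if_pos ⟨hT.1, hT.2.2.1⟩, Tf, if_pos hT]
      · rw [Tf, if_neg hT]
        split_ifs with hA hB <;> try rfl
        exact absurd ⟨hB.1, hA, hB.2, h1.2⟩ hT
    · have hz : (if j < l then (if gv nums j < gv nums l then Cv nums l j else 0) else 0) = 0 := by
        split_ifs with hA hB <;> try rfl
        exact absurd ⟨hA, hB⟩ h1
      rw [hz]
      symm
      apply Finset.sum_eq_zero
      intro k _
      rw [Tf, if_neg (fun h => h1 ⟨Nat.lt_trans h.1 h.2.1, h.2.2.2⟩)]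
  rw [step1, Tsum, Finset.sum_comm]
  apply Finset.sum_congr rfl
  intro j _
  rw [Finset.sum_comm]

lemma BA_eq_T (nums : List Int) : BA nums nums.length = Tsum nums := by
  simp only [BA, Tsum]
  apply Finset.sum_congr rfl
  intro j hj
  simp only [Finset.mem_range] at hj
  have hM : j + 1 + (nums.length - (j+1)) = nums.length := by omega
  -- rewrite each term as a sum over s
  have hterm : ∀ t ∈ Finset.range (nums.length - (j+1)),
      (if gv nums j < gv nums (j+1+t) then 0
       else Lv nums j (j+1+t) * Hv nums j t (nums.length - (j+1)))
      = ∑ s ∈ Finset.range (nums.length - (j+1)),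
          (if gv nums (j+1+t) ≤ gv nums j ∧ j+1+t < j+1+s ∧ gv nums j < gv nums (j+1+s)
           then Lv nums j (j+1+t) else 0) := by
    intro t _
    by_cases hc : gv nums j < gv nums (j+1+t)
    · rw [if_pos hc]
      symm
      apply Finset.sum_eq_zero
      intro s _
      rw [if_neg (fun h => absurd hc (not_lt.mpr h.1))]
    · rw [if_neg hc, Hv, Finset.mul_sum]
      apply Finset.sum_congr rfl
      intro s _
      rw [mul_ite, mul_one, mul_zero]
      by_cases hd : t < s ∧ gv nums j < gv nums (j+1+s)
      · rw [if_pos hd, if_pos ⟨not_lt.mp hc, by omega, hd.2⟩]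
      · rw [if_neg hd, if_neg (fun h => hd ⟨by omega, h.2.2⟩)]
  rw [Finset.sum_congr rfl hterm]
  -- inner shift: s ↦ l
  have hin : ∀ t ∈ Finset.range (nums.length - (j+1)),
      (∑ s ∈ Finset.range (nums.length - (j+1)),
          (if gv nums (j+1+t) ≤ gv nums j ∧ j+1+t < j+1+s ∧ gv nums j < gv nums (j+1+s)
           then Lv nums j (j+1+t) else 0))
      = ∑ l ∈ Finset.range nums.length,
          (if j+1 ≤ l then
            (if gv nums (j+1+t) ≤ gv nums j ∧ j+1+t < l ∧ gv nums j < gv nums l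
             then Lv nums j (j+1+t) else 0) else 0) := by
    intro t _
    rw [show (Finset.range nums.length) = Finset.range (j+1+(nums.length - (j+1))) from by rw [hM]]
    exact sum_shift (j+1) (nums.length - (j+1))
      (fun l => if gv nums (j+1+t) ≤ gv nums j ∧ j+1+t < l ∧ gv nums j < gv nums l
                then Lv nums j (j+1+t) else 0)
  rw [Finset.sum_congr rfl hin]
  -- outer shift: t ↦ k
  rw [show (∑ t ∈ Finset.range (nums.length - (j+1)),
        ∑ l ∈ Finset.range nums.length,
          (if j+1 ≤ l then
            (if gv nums (j+1+t) ≤ gv nums j ∧ j+1+t < l ∧ gv nums j < gv nums l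
             then Lv nums j (j+1+t) else 0) else 0))
      = ∑ k ∈ Finset.range (j+1+(nums.length - (j+1))),
          (if j+1 ≤ k then
            (∑ l ∈ Finset.range nums.length,
              (if j+1 ≤ l then
                (if gv nums k ≤ gv nums j ∧ k < l ∧ gv nums j < gv nums l
                 then Lv nums j k else 0) else 0)) else 0) from
    sum_shift (j+1) (nums.length - (j+1))
      (fun k => ∑ l ∈ Finset.range nums.length,
        (if j+1 ≤ l then
          (if gv nums k ≤ gv nums j ∧ k < l ∧ gv nums j < gv nums l
           then Lv nums j k else 0) else 0))]
  rw [show Finset.range (j+1+(nums.length - (j+1))) = Finset.range nums.length from by rw [hM]]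
  -- pointwise: collapse the guards into Tf
  apply Finset.sum_congr rfl
  intro k _
  by_cases hk : j+1 ≤ k
  · rw [if_pos hk]
    apply Finset.sum_congr rfl
    intro l _
    rw [Tf]
    by_cases hT : j < k ∧ k < l ∧ gv nums k ≤ gv nums j ∧ gv nums j < gv nums l
    · rw [if_pos (by omega : j+1 ≤ l), if_pos ⟨hT.2.2.1, hT.2.1, hT.2.2.2⟩, if_pos hT]
    · rw [if_neg hT]
      split_ifs with hA hB <;> try rfl
      exact absurd ⟨hk, hB.2.1, hB.1, hB.2.2⟩ hT
  · rw [if_neg hk]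
    symm
    apply Finset.sum_eq_zero
    intro l _
    rw [Tf, if_neg (fun h => hk h.1)]

lemma portA (nums : List Int) :
    countQuadruplets1 nums
      = ((List.range nums.length).foldl (outA nums) ((0:Int), List.replicate nums.length (0:Int))).1 := rfl

lemma portB (nums : List Int) :
    countQuadruplets1_alt nums
      = ((List.range nums.length).foldl (outB nums) ((0:Int), List.replicate nums.length (0:Int))).1 := rfl

lemma A_closed (nums : List Int) : countQuadruplets1 nums = AA nums nums.length := by
  rw [portA]; exact (outerA nums nums.length le_rfl).1

lemma B_closed (nums : List Int) : countQuadruplets1_alt nums = BA nums nums.length := by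
  rw [portB]; exact (outerB nums nums.length le_rfl).1

-- ===== VERDICT (by name: the statement is the Claim_ definition above) =====
theorem countQuadruplets1_spec : Claim_equal_countQuadruplets1 := by
  intro nums _
  unfold Spec_countQuadruplets1
  rw [A_closed, B_closed, AA_eq_T, BA_eq_T]
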